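-- pv_equiv track=rewrite | github.com/tteofili/rally | esrally/driver/runner.py | _error_status_summary
-- ===== SOURCE A (Python) =====
-- def _error_status_summary(error_details):
--     """
--     Generates error status code summary.
--
--     :param error_details: accumulated error details
--     :return: error status summary
--     """
--     status_counts = {}
--     for status, _ in error_details:
--         status_counts[status] = status_counts.get(status, 0) + 1
--     status_summaries = []
--     for status in sorted(status_counts.keys()):
--         status_summaries.append(f"{status_counts[status]}x{status}")
--     return ", ".join(status_summaries)
-- ===== SOURCE B (Python) =====
-- def _error_status_summary(error_details):
--     statuses = sorted(status for status, _ in error_details)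
--     parts = []
--     i = 0
--     n = len(statuses)
--     while i < n:
--         j = i
--         while j < n and statuses[j] == statuses[i]:
--             j += 1
--         parts.append(f"{j - i}x{statuses[i]}")
--         i = j
--     return ", ".join(parts)
-- ===== Notes on version B (the rewrite author's own statement) =====
-- stated objective: alternative
-- what changed: Replaced the dict-accumulate-then-sort-keys strategy with sort-then-run-length-encode: sort the statuses once and make a single pass that counts each maximal run of equal adjacent statuses, so no counter dict (and no set of keys) is built.
import Mathlib
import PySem

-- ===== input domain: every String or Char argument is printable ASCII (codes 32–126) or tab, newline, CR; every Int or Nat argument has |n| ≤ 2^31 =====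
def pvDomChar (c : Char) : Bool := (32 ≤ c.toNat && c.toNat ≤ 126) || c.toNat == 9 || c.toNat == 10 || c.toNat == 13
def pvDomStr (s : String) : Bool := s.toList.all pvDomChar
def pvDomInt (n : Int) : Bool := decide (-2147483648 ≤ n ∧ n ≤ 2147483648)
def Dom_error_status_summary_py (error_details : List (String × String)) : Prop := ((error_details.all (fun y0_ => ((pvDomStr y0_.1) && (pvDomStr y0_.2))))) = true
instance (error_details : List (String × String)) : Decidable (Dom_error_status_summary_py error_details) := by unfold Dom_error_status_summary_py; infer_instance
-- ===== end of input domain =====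

-- B sorts the statuses once and run-length-encodes adjacent equal runs in a single pass, instead of A's counter dict followed by sorting its keys; return values proved equal.


-- ===== PORT A =====
-- status_counts[status] is looked up with getD 0: the key is always present, so this is exact.
def error_status_summary_py (error_details : List (String × String)) : String :=
  let status_counts : PySem.Dict String Int :=
    error_details.foldl (fun d p => d.insert p.1 (d.getD p.1 0 + 1)) PySem.Dict.empty
  let status_summaries : List String :=
    (PySem.List.sorted status_counts.keys (fun s => s) false).map
      (fun status => PySem.Int.toStr (status_counts.getD status 0) ++ "x" ++ status)
  PySem.Str.join ", " status_summaries

-- ===== PORT B =====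
-- B's inner while loop scans forward while statuses[j] == statuses[i]: that is takeWhile
-- (run length j - i = 1 + length of the equal run after the head) / dropWhile (resume at i = j);
-- the outer while loop over the sorted list becomes this structural recursion.
def pvRle : List String → List String
  | [] => []
  | s :: rest =>
    (PySem.Int.toStr ((1 : Int) + (rest.takeWhile (· == s)).length) ++ "x" ++ s)
      :: pvRle (rest.dropWhile (· == s))
termination_by l => l.length
decreasing_by
  simpa using Nat.lt_succ_of_le (List.length_dropWhile_le (· == s) rest)

def error_status_summary_py_alt (error_details : List (String × String)) : String :=
  let statuses : List String :=
    PySem.List.sorted (error_details.map (fun p => p.1)) (fun s => s) false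
  PySem.Str.join ", " (pvRle statuses)

-- ===== PRECONDITION & SPEC =====
def Spec_error_status_summary_py (error_details : List (String × String)) (out : String) : Prop := out = error_status_summary_py_alt error_details
instance (error_details : List (String × String)) (out : String) : Decidable (Spec_error_status_summary_py error_details out) := by unfold Spec_error_status_summary_py; infer_instance

-- ===== CLAIM (what is proved, stated in full; the proofs are below) =====
def Claim_equal_error_status_summary_py : Prop := ∀ (error_details : List (String × String)), Dom_error_status_summary_py error_details → Spec_error_status_summary_py error_details (error_status_summary_py error_details)

-- ===== LEMMAS AND PROOFS =====

-- A's insert/getD counting loop over the pairs is Counter(statuses).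
theorem counts_eq_counter (error_details : List (String × String)) :
    error_details.foldl (fun d p => d.insert p.1 (d.getD p.1 0 + 1)) PySem.Dict.empty
      = PySem.Dict.counter (error_details.map (fun p => p.1)) := by
  rw [← PySem.Dict.foldl_insert_getD_add_one_eq_counter, List.foldl_map]

-- the run heads of a list: first element of each maximal block of equal adjacent elements
def pvHeads : List String → List String
  | [] => []
  | s :: rest => s :: pvHeads (rest.dropWhile (· == s))
termination_by l => l.length
decreasing_by
  simpa using Nat.lt_succ_of_le (List.length_dropWhile_le (· == s) rest)

-- on a sorted list, everything after the head's run is strictly greater than the head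
theorem lt_of_mem_dropWhile (s : String) (rest : List String)
    (hp : (s :: rest).Pairwise (· ≤ ·)) :
    ∀ x ∈ rest.dropWhile (· == s), s < x := by
  induction rest with
  | nil => simp
  | cons r rest' ih =>
    intro x hx
    rcases List.pairwise_cons.1 hp with ⟨hle, hp'⟩
    by_cases hrs : r = s
    · subst hrs
      rw [List.dropWhile_cons, if_pos (by simp)] at hx
      exact ih (List.pairwise_cons.2 ⟨fun y hy => hle y (List.mem_cons_of_mem _ hy),
        (List.pairwise_cons.1 hp').2⟩) x hx
    · rw [List.dropWhile_cons, if_neg (by simpa using hrs)] at hx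
      rcases List.mem_cons.1 hx with rfl | hx'
      · exact lt_of_le_of_ne (hle x List.mem_cons_self) (fun h => hrs h.symm)
      · exact lt_of_lt_of_le
          (lt_of_le_of_ne (hle r List.mem_cons_self) (fun h => hrs h.symm))
          ((List.pairwise_cons.1 hp').1 x hx')

theorem mem_pvHeads (x : String) : ∀ (l : List String), x ∈ pvHeads l ↔ x ∈ l := by
  intro l
  induction l using pvHeads.induct with
  | case1 => simp [pvHeads]
  | case2 s rest ih =>
    rw [pvHeads]
    constructor
    · intro h
      rcases List.mem_cons.1 h with rfl | h'
      · exact List.mem_cons_self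
      · exact List.mem_cons_of_mem _
          ((List.dropWhile_sublist (p := (· == s)) (l := rest)).mem (ih.1 h'))
    · intro h
      rcases List.mem_cons.1 h with rfl | h'
      · exact List.mem_cons_self
      · rcases (List.mem_append.1 ((List.takeWhile_append_dropWhile
            (p := (· == s)) (l := rest)) ▸ h')) with ht | hd
        · have h2 := List.mem_takeWhile_imp ht
          simp only [beq_iff_eq] at h2
          exact h2 ▸ List.mem_cons_self
        · exact List.mem_cons_of_mem _ (ih.2 hd)

theorem pvHeads_pairwise_lt : ∀ (l : List String), l.Pairwise (· ≤ ·) →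
    (pvHeads l).Pairwise (· < ·) := by
  intro l
  induction l using pvHeads.induct with
  | case1 => simp [pvHeads]
  | case2 s rest ih =>
    intro hp
    rw [pvHeads]
    have hpd : (rest.dropWhile (· == s)).Pairwise (· ≤ ·) :=
      List.Pairwise.sublist (List.dropWhile_sublist _) (List.pairwise_cons.1 hp).2
    refine List.pairwise_cons.2 ⟨fun y hy => ?_, ih hpd⟩
    exact lt_of_mem_dropWhile s rest hp y ((mem_pvHeads y _).1 hy)

-- run-length encoding of a sorted list is the per-head count rendering
theorem pvRle_eq_map_heads : ∀ (l : List String), l.Pairwise (· ≤ ·) →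
    pvRle l = (pvHeads l).map
      (fun s => PySem.Int.toStr ((l.count s : Int)) ++ "x" ++ s) := by
  intro l
  induction l using pvRle.induct with
  | case1 => simp [pvRle, pvHeads]
  | case2 s rest ih =>
    intro hp
    have hgt := lt_of_mem_dropWhile s rest hp
    have hpd : (rest.dropWhile (· == s)).Pairwise (· ≤ ·) :=
      List.Pairwise.sublist (List.dropWhile_sublist _) (List.pairwise_cons.1 hp).2
    have hrestcount : ∀ y : String, rest.count y
        = (rest.takeWhile (· == s)).count y + (rest.dropWhile (· == s)).count y := by
      intro y
      conv_lhs => rw [← List.takeWhile_append_dropWhile (p := (· == s)) (l := rest)]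
      rw [List.count_append]
    rw [pvRle, pvHeads, List.map_cons, ih hpd]
    congr 1
    · -- head: the count of s in the whole list is 1 + the take-run length
      have hnot : (rest.dropWhile (· == s)).count s = 0 := by
        rw [List.count_eq_zero]
        intro hmem
        exact lt_irrefl s (hgt s hmem)
      have htake : (rest.takeWhile (· == s)).count s
          = (rest.takeWhile (· == s)).length := by
        rw [List.count_eq_length]
        intro y hy
        have h2 := List.mem_takeWhile_imp hy
        simp only [beq_iff_eq] at h2
        exact h2.symm
      have hc : (((s :: rest).count s : Nat) : Int)
          = 1 + (rest.takeWhile (· == s)).length := by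
        rw [List.count_cons_self, hrestcount s, hnot, htake]
        push_cast
        ring
      rw [hc]
    · -- tail: counts of later heads are unaffected by the head's run
      apply List.map_congr_left
      intro x hx
      have hxd : x ∈ rest.dropWhile (· == s) := (mem_pvHeads x _).1 hx
      have hxs : s < x := hgt x hxd
      have ht0 : (rest.takeWhile (· == s)).count x = 0 := by
        rw [List.count_eq_zero]
        intro hmem
        have h2 := List.mem_takeWhile_imp hmem
        simp only [beq_iff_eq] at h2
        exact (ne_of_lt hxs) h2.symm
      have hcs : (s :: rest).count x = (rest.dropWhile (· == s)).count x := by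
        rw [List.count_cons_of_ne (ne_of_lt hxs), hrestcount x, ht0]
        omega
      rw [hcs]

-- sorted(set(xs)) is exactly the run heads of sorted(xs)
theorem sorted_set_eq_heads (xs : List String) :
    PySem.List.sorted (PySem.Set.ofList xs) (fun s => s) false
      = pvHeads (PySem.List.sorted xs (fun s => s) false) := by
  have hl : (PySem.List.sorted xs (fun s => s) false).Pairwise (· ≤ ·) :=
    PySem.List.sorted_pairwise xs (fun s => s)
  have hnodup : (pvHeads (PySem.List.sorted xs (fun s => s) false)).Nodup :=
    (pvHeads_pairwise_lt _ hl).imp ne_of_lt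
  have hperm : (pvHeads (PySem.List.sorted xs (fun s => s) false)).Perm
      (PySem.Set.ofList xs) := by
    rw [List.perm_ext_iff_of_nodup hnodup (PySem.Set.nodup_ofList xs)]
    intro a
    rw [mem_pvHeads, PySem.List.mem_sorted, PySem.Set.mem_ofList]
  exact PySem.List.sorted_eq_of_perm_of_pairwise_lt _ _ _ hperm
    (pvHeads_pairwise_lt _ hl)

-- ===== VERDICT (by name: the statement is the Claim_ definition above) =====
theorem error_status_summary_py_spec : Claim_equal_error_status_summary_py := by
  intro ed _
  unfold Spec_error_status_summary_py error_status_summary_py error_status_summary_py_alt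
  simp only [counts_eq_counter, PySem.Dict.keys_counter, PySem.Dict.getD_counter,
    sorted_set_eq_heads]
  congr 1
  rw [pvRle_eq_map_heads _ (PySem.List.sorted_pairwise _ _)]
  apply List.map_congr_left
  intro x _
  rw [List.Perm.count_eq (PySem.List.sorted_perm _ _ _)]
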